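-- pv_equiv track=rewrite | github.com/fenyx-it-academy/16.Hafta-Odevler | 16.haft.2.ödev bir karakter dizisini belli sayıda hamle ile başka bir karakter dizisine çevirip çevirememe.py | fonnk
-- ===== SOURCE A (Python) =====
-- def fonnk (s,t,k):
--     slen=len(s)
--     tlen=len(t)
--     aynı=0
--     for i in range (1,slen+1):
--         if s[0:i]==t[0:i]:
--             aynı+=1
--     k1=slen-aynı
--     k2=tlen-aynı
--     if k1+k2 >k:
--         return "No"
--     if k==k1+k2:
--         return "Yes"
--     if k1+k2<k:
--         if (2*aynı)+k1+k2<k: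
--             return "Yes"
--         if (k-(k1+k2))%2==0:
--             return "Yes"
--         else:
--             return "No"
-- ===== SOURCE B (Python) =====
-- def fonnk(s, t, k):
--     # single pass: length of the common prefix of s and t
--     cp = 0
--     for a, b in zip(s, t):
--         if a != b:
--             break
--         cp += 1
--     total = len(s) + len(t) - 2 * cp
--     if total <= k and ((k - total) % 2 == 0 or len(s) + len(t) < k):
--         return "Yes"
--     return "No"
-- ===== Notes on version B (the rewrite author's own statement) =====
-- stated objective: faster
-- what changed: replaces the quadratic loop comparing every prefix pair s[0:i]==t[0:i] by a single character-by-character pass computing the common prefix length, and collapses the branch cascade into one parity condition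
import Mathlib
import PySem

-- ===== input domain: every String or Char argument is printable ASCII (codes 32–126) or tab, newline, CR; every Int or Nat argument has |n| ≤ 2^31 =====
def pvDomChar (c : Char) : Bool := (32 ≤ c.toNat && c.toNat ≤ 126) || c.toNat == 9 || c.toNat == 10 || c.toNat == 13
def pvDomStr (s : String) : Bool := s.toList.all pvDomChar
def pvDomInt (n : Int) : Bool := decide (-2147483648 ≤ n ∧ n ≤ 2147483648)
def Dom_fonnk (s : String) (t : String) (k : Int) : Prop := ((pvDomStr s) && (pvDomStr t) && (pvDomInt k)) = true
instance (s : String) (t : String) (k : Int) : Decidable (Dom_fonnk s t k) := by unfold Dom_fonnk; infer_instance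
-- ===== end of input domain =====

-- B replaces A's quadratic all-prefixes comparison by a single common-prefix pass (objective: faster).


-- ===== PORT A =====
-- literal port of A: counts i in range(1, slen+1) with s[0:i] == t[0:i], then the branch cascade
def fonnk (s : String) (t : String) (k : Int) : String :=
  let sl := s.toList
  let tl := t.toList
  let slen : Int := sl.length
  let tlen : Int := tl.length
  let ayni : Int := (PySem.List.pyRange 1 (slen + 1) 1).foldl
    (fun acc i => if PySem.List.slice sl (some 0) (some i) = PySem.List.slice tl (some 0) (some i)
                  then acc + 1 else acc) 0
  let k1 := slen - ayni
  let k2 := tlen - ayni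
  if k1 + k2 > k then "No"
  else if k = k1 + k2 then "Yes"
  else if k1 + k2 < k then
    (if 2 * ayni + (k1 + k2) < k then "Yes"
     else if PySem.Int.mod (k - (k1 + k2)) 2 = 0 then "Yes" else "No")
  else ""  -- unreachable (trichotomy); Python would fall off the end here

-- ===== PORT B =====
-- B's loop over zip(s, t) with break on the first mismatch
def fonnkCpLoop : List (Char × Char) → Int → Int
  | [], acc => acc
  | (a, b) :: rest, acc => if a = b then fonnkCpLoop rest (acc + 1) else acc

def fonnk_alt (s : String) (t : String) (k : Int) : String :=
  let sl := s.toList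
  let tl := t.toList
  let cp : Int := fonnkCpLoop (sl.zip tl) 0
  let total : Int := (sl.length : Int) + tl.length - 2 * cp
  if total ≤ k ∧ (PySem.Int.mod (k - total) 2 = 0 ∨ (sl.length : Int) + tl.length < k)
  then "Yes" else "No"

-- ===== PRECONDITION & SPEC =====
def Spec_fonnk (s : String) (t : String) (k : Int) (out : String) : Prop := out = fonnk_alt s t k
instance (s : String) (t : String) (k : Int) (out : String) : Decidable (Spec_fonnk s t k out) := by unfold Spec_fonnk; infer_instance

-- ===== CLAIM (what is proved, stated in full; the proofs are below) =====
def Claim_equal_fonnk : Prop := ∀ (s : String) (t : String) (k : Int), Dom_fonnk s t k → Spec_fonnk s t k (fonnk s t k)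

-- ===== LEMMAS AND PROOFS =====

-- structural common-prefix length (the value B's loop computes)
def fonnkCpn : List Char → List Char → Nat
  | a :: as, b :: bs => if a = b then fonnkCpn as bs + 1 else 0
  | _, _ => 0

theorem fonnkCpLoop_eq (xs ys : List Char) (acc : Int) :
    fonnkCpLoop (xs.zip ys) acc = acc + fonnkCpn xs ys := by
  induction xs generalizing ys acc with
  | nil => simp [fonnkCpLoop, fonnkCpn]
  | cons a as ih =>
    cases ys with
    | nil => simp [fonnkCpLoop, fonnkCpn]
    | cons b bs =>
      simp only [List.zip_cons_cons, fonnkCpLoop, fonnkCpn]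
      split
      · rw [ih]; push_cast; ring
      · simp

theorem fonnkCpn_le (xs ys : List Char) : fonnkCpn xs ys ≤ xs.length := by
  induction xs generalizing ys with
  | nil => cases ys <;> simp [fonnkCpn]
  | cons a as ih =>
    cases ys with
    | nil => simp [fonnkCpn]
    | cons b bs =>
      simp only [fonnkCpn, List.length_cons]
      split
      · exact Nat.succ_le_succ (ih bs)
      · omega

-- prefixes of length m ≤ |xs| agree exactly when m does not pass the common prefix
theorem fonnk_take_eq_iff (xs ys : List Char) (m : Nat) (hm : m ≤ xs.length) :
    xs.take m = ys.take m ↔ m ≤ fonnkCpn xs ys := by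
  induction xs generalizing ys m with
  | nil =>
    have hm0 : m = 0 := Nat.le_zero.mp hm
    subst hm0
    simp [fonnkCpn]
  | cons a as ih =>
    cases m with
    | zero => simp
    | succ j =>
      cases ys with
      | nil =>
        simp only [List.take_succ_cons, List.take_nil, fonnkCpn]
        constructor
        · intro h; cases h
        · omega
      | cons b bs =>
        simp only [List.take_succ_cons, List.cons.injEq, fonnkCpn]
        by_cases hab : a = b
        · subst hab
          rw [if_pos rfl]
          simp only [true_and]
          rw [ih bs j (by simpa using Nat.le_of_succ_le_succ hm)]
          omega
        · simp only [if_neg hab]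
          constructor
          · rintro ⟨h, -⟩; exact absurd h hab
          · omega

-- the prefix-comparison counted by A, rewritten on Nat indices
theorem fonnk_countP_range (xs ys : List Char) (n : Nat) (hn : n ≤ xs.length) :
    (List.range n).countP (fun j => decide (xs.take (j + 1) = ys.take (j + 1)))
      = min n (fonnkCpn xs ys) := by
  induction n with
  | zero => simp
  | succ m ih =>
    rw [List.range_succ, List.countP_append, ih (by omega)]
    have h := fonnk_take_eq_iff xs ys (m + 1) hn
    have hle := fonnkCpn_le xs ys
    by_cases hc : m + 1 ≤ fonnkCpn xs ys
    · have hd : (decide (xs.take (m + 1) = ys.take (m + 1))) = true := decide_eq_true (h.mpr hc)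
      simp only [List.countP_cons, List.countP_nil, hd, if_true]
      omega
    · have hd : (decide (xs.take (m + 1) = ys.take (m + 1))) = false :=
        decide_eq_false (fun he => hc (h.mp he))
      simp only [List.countP_cons, List.countP_nil, hd, Bool.false_eq_true, if_false]
      omega

-- A's counting loop computes exactly the common prefix length
theorem fonnk_count_eq (xs ys : List Char) :
    (PySem.List.pyRange 1 ((xs.length : Int) + 1) 1).foldl
      (fun acc i => if PySem.List.slice xs (some 0) (some i) = PySem.List.slice ys (some 0) (some i)
                    then acc + 1 else acc) 0
      = (fonnkCpn xs ys : Int) := by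
  rw [PySem.List.foldl_ite_add_one, PySem.List.pyRange_one]
  have h1 : ((xs.length : Int) + 1 - 1).toNat = xs.length := by omega
  rw [h1, List.countP_map]
  simp only [Function.comp_def]
  have hfun : (fun j : Nat => decide (PySem.List.slice xs (some 0) (some (1 + (j : Int)))
                  = PySem.List.slice ys (some 0) (some (1 + (j : Int)))))
      = fun j : Nat => decide (xs.take (j + 1) = ys.take (j + 1)) := by
    funext j
    have hc : (1 : Int) + (j : Int) = ((j + 1 : Nat) : Int) := by push_cast; ring
    rw [hc, PySem.List.slice_zero_start, PySem.List.slice_zero_start,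
        PySem.List.slice_to_natCast, PySem.List.slice_to_natCast]
  rw [hfun, fonnk_countP_range xs ys xs.length le_rfl]
  have := fonnkCpn_le xs ys
  omega

-- the two branch cascades agree as pure Int arithmetic
theorem fonnk_branches (slen tlen cp k : Int) (h0 : 0 ≤ cp) :
    (if (slen - cp) + (tlen - cp) > k then "No"
     else if k = (slen - cp) + (tlen - cp) then "Yes"
     else if (slen - cp) + (tlen - cp) < k then
       (if 2 * cp + ((slen - cp) + (tlen - cp)) < k then "Yes"
        else if PySem.Int.mod (k - ((slen - cp) + (tlen - cp))) 2 = 0 then "Yes" else "No")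
     else "")
    = (if slen + tlen - 2 * cp ≤ k ∧
          (PySem.Int.mod (k - (slen + tlen - 2 * cp)) 2 = 0 ∨ slen + tlen < k)
       then "Yes" else "No") := by
  rw [PySem.Int.mod_eq_emod_of_pos (by norm_num), PySem.Int.mod_eq_emod_of_pos (by norm_num)]
  have harg : k - ((slen - cp) + (tlen - cp)) = k - (slen + tlen - 2 * cp) := by ring
  rw [harg]
  split_ifs <;> first | rfl | omega

theorem fonnk_eq_alt (s t : String) (k : Int) : fonnk s t k = fonnk_alt s t k := by
  show (let sl := s.toList; _) = (let sl := s.toList; _)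
  simp only [fonnk, fonnk_alt]
  rw [fonnk_count_eq, fonnkCpLoop_eq, zero_add]
  exact fonnk_branches _ _ _ k (by positivity)

-- ===== VERDICT (by name: the statement is the Claim_ definition above) =====
theorem fonnk_spec : Claim_equal_fonnk := by
  intro s t k _
  exact fonnk_eq_alt s t k
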